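-- pv_equiv track=rewrite | github.com/voici5986/WeChatDataAnalysis | src/wechat_decrypt_tool/wrapped/cards/card_02_message_chars.py | _pick_book_analogy
-- ===== SOURCE A (Python) =====
-- from typing import Any, Optional
--
-- _BOOK_ANALOGIES: list[dict[str, Any]] = [
--     {"min": 1, "max": 100_000, "level": "小量级", "options": ["一本《小王子》", "一本《解忧杂货店》"]},
--     {"min": 100_000, "max": 500_000, "level": "中量级", "options": ["一本《三体Ⅰ：地球往事》", "一套《朝花夕拾+呐喊》（鲁迅经典合集）"]},
--     {"min": 500_000, "max": 1_000_000, "level": "大量级", "options": ["一本《红楼梦》（全本）", "一本《百年孤独》（全本无删减）"]},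
--     {"min": 1_000_000, "max": 5_000_000, "level": "超大量级", "options": ["一套《三体》全三册", "一本《西游记》（全本白话文）"]},
--     {"min": 5_000_000, "max": 10_000_000, "level": "千万级Ⅰ", "options": ["一套金庸武侠《射雕+神雕+倚天》（经典三部曲）", "一套《平凡的世界》全三册"]},
--     {"min": 10_000_000, "max": 50_000_000, "level": "千万级Ⅱ", "options": ["一套《哈利·波特》全七册（中文版）", "一本《资治通鉴》（文白对照全本）"]},
--     {"min": 50_000_000, "max": 100_000_000, "level": "亿级Ⅰ", "options": ["一套《冰与火之歌》全系列（中文版）", "一本《史记》（全本含集解索隐正义）"]},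
--     {"min": 100_000_000, "max": 500_000_000, "level": "亿级Ⅱ", "options": ["一套《中国大百科全书》（单卷本全册）", "一套《金庸武侠全集》（15部完整版）"]},
--     {"min": 500_000_000, "max": None, "level": "亿级Ⅲ", "options": ["一套《四库全书》（文津阁精选集）", "一套《大英百科全书》（国际完整版）"]},
-- ]
--
-- def _pick_option(options: list[str], *, seed: int) -> str:
--     if not options:
--         return ""
--     idx = abs(int(seed)) % len(options)
--     return str(options[idx] or "").strip()
--
-- def _pick_book_analogy(chars: int) -> Optional[dict[str, Any]]:
--     n = int(chars or 0)
--     if n <= 0: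
--         return None
--
--     for row in _BOOK_ANALOGIES:
--         lo = int(row["min"] or 0)
--         hi = row.get("max")
--         if n < lo:
--             continue
--         if hi is None or n < int(hi):
--             picked = _pick_option(list(row.get("options") or []), seed=n)
--             return {
--                 "level": str(row.get("level") or ""),
--                 "book": picked,
--                 "text": f"相当于写了{picked}" if picked else "",
--             }
--     return None
-- ===== SOURCE B (Python) =====
-- from typing import Any, Optional
--
-- _BOOK_ANALOGIES: list[dict[str, Any]] = [
--     {"min": 1, "max": 100_000, "level": "小量级", "options": ["一本《小王子》", "一本《解忧杂货店》"]},
--     {"min": 100_000, "max": 500_000, "level": "中量级", "options": ["一本《三体Ⅰ：地球往事》", "一套《朝花夕拾+呐喊》（鲁迅经典合集）"]},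
--     {"min": 500_000, "max": 1_000_000, "level": "大量级", "options": ["一本《红楼梦》（全本）", "一本《百年孤独》（全本无删减）"]},
--     {"min": 1_000_000, "max": 5_000_000, "level": "超大量级", "options": ["一套《三体》全三册", "一本《西游记》（全本白话文）"]},
--     {"min": 5_000_000, "max": 10_000_000, "level": "千万级Ⅰ", "options": ["一套金庸武侠《射雕+神雕+倚天》（经典三部曲）", "一套《平凡的世界》全三册"]},
--     {"min": 10_000_000, "max": 50_000_000, "level": "千万级Ⅱ", "options": ["一套《哈利·波特》全七册（中文版）", "一本《资治通鉴》（文白对照全本）"]},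
--     {"min": 50_000_000, "max": 100_000_000, "level": "亿级Ⅰ", "options": ["一套《冰与火之歌》全系列（中文版）", "一本《史记》（全本含集解索隐正义）"]},
--     {"min": 100_000_000, "max": 500_000_000, "level": "亿级Ⅱ", "options": ["一套《中国大百科全书》（单卷本全册）", "一套《金庸武侠全集》（15部完整版）"]},
--     {"min": 500_000_000, "max": None, "level": "亿级Ⅲ", "options": ["一套《四库全书》（文津阁精选集）", "一套《大英百科全书》（国际完整版）"]},
-- ]
--
-- # ascending upper bounds of all rows except the open-ended last one
-- _BOUNDS: list[int] = [int(r["max"]) for r in _BOOK_ANALOGIES[:-1]]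
--
-- def _pick_option(options: list[str], *, seed: int) -> str:
--     if not options:
--         return ""
--     idx = abs(int(seed)) % len(options)
--     return str(options[idx] or "").strip()
--
-- def _bisect_right(a: list[int], x: int) -> int:
--     lo, hi = 0, len(a)
--     while lo < hi:
--         mid = (lo + hi) // 2
--         if x < a[mid]:
--             hi = mid
--         else:
--             lo = mid + 1
--     return lo
--
-- def _pick_book_analogy(chars: int) -> Optional[dict[str, Any]]:
--     n = int(chars or 0)
--     if n <= 0:
--         return None
--     row = _BOOK_ANALOGIES[_bisect_right(_BOUNDS, n)]
--     picked = _pick_option(list(row["options"]), seed=n)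
--     return {
--         "level": str(row["level"]),
--         "book": picked,
--         "text": f"相当于写了{picked}" if picked else "",
--     }
-- ===== Notes on version B (the rewrite author's own statement) =====
-- stated objective: idiomatic
-- what changed: Replaces A's linear scan over the analogy rows (re-checking each row's min/max) with a precomputed list of upper bounds and a hand-rolled bisect_right binary search that yields the row index directly.
import Mathlib
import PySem

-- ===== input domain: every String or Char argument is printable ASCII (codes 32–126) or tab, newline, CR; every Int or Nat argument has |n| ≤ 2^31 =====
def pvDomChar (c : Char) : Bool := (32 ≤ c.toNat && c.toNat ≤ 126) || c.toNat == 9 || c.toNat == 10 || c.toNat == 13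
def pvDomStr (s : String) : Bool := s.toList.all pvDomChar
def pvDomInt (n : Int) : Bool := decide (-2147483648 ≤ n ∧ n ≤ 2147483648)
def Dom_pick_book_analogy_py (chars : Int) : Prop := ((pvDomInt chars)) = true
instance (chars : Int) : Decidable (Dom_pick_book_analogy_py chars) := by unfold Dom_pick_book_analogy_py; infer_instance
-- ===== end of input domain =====

-- B replaces A's linear scan over the rows by a binary search on the precomputed list of
-- upper bounds (idiomatic bisect_right); return value proved identical for every Int.

-- ===== PORT A =====
-- a row: (min, max (None for the last row), level, options)
def pvRowsA : List (Int × Option Int × String × List String) :=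
  [ (1, some 100000, "小量级", ["一本《小王子》", "一本《解忧杂货店》"]),
    (100000, some 500000, "中量级", ["一本《三体Ⅰ：地球往事》", "一套《朝花夕拾+呐喊》（鲁迅经典合集）"]),
    (500000, some 1000000, "大量级", ["一本《红楼梦》（全本）", "一本《百年孤独》（全本无删减）"]),
    (1000000, some 5000000, "超大量级", ["一套《三体》全三册", "一本《西游记》（全本白话文）"]),
    (5000000, some 10000000, "千万级Ⅰ", ["一套金庸武侠《射雕+神雕+倚天》（经典三部曲）", "一套《平凡的世界》全三册"]),
    (10000000, some 50000000, "千万级Ⅱ", ["一套《哈利·波特》全七册（中文版）", "一本《资治通鉴》（文白对照全本）"]),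
    (50000000, some 100000000, "亿级Ⅰ", ["一套《冰与火之歌》全系列（中文版）", "一本《史记》（全本含集解索隐正义）"]),
    (100000000, some 500000000, "亿级Ⅱ", ["一套《中国大百科全书》（单卷本全册）", "一套《金庸武侠全集》（15部完整版）"]),
    (500000000, none, "亿级Ⅲ", ["一套《四库全书》（文津阁精选集）", "一套《大英百科全书》（国际完整版）"]) ]

-- _pick_option; the index is in range whenever options ≠ [] (Python never raises there)
def pvPickOptionA (options : List String) (seed : Int) : String :=
  if options = [] then ""
  else
    let idx : Int := (seed.natAbs : Int) % (options.length : Int)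
    match PySem.List.pyGet? options idx with
    | some s => PySem.Str.strip (if s = "" then "" else s)
    | none => ""   -- unreachable: 0 ≤ idx < length

def pvMkA (level : String) (options : List String) (n : Int) : List (String × String) :=
  let picked := pvPickOptionA (if options = [] then [] else options) n
  [ ("level", if level = "" then "" else level),
    ("book", picked),
    ("text", if picked = "" then "" else "相当于写了" ++ picked) ]

def pvScanA (n : Int) : List (Int × Option Int × String × List String) → Option (List (String × String))
  | [] => none
  | (lo, hi, level, options) :: rest =>
    let lo := if lo = 0 then 0 else lo
    if n < lo then pvScanA n rest
    else
      match hi with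
      | none => some (pvMkA level options n)
      | some h => if n < h then some (pvMkA level options n) else pvScanA n rest

def pick_book_analogy_py (chars : Int) : Option (List (String × String)) :=
  let n := if chars = 0 then 0 else chars
  if n ≤ 0 then none else pvScanA n pvRowsA

-- ===== PORT B =====
def pvRowsB : List (Int × Option Int × String × List String) := pvRowsA

-- _BOUNDS = [int(r["max"]) for r in _BOOK_ANALOGIES[:-1]]  (every such max is an int)
def pvBoundsB : List Int := (pvRowsB.dropLast).map (fun r => r.2.1.getD 0)

def pvPickOptionB (options : List String) (seed : Int) : String :=
  if options = [] then ""
  else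
    let idx : Int := (seed.natAbs : Int) % (options.length : Int)
    match PySem.List.pyGet? options idx with
    | some s => PySem.Str.strip (if s = "" then "" else s)
    | none => ""   -- unreachable: 0 ≤ idx < length

-- hand-rolled bisect_right (while lo < hi: mid = (lo+hi)//2; …); fuel bounds the
-- iteration count (fuel = len(a) always suffices since hi-lo at least halves)
def pvBisectGo (a : List Int) (x : Int) : Nat → Nat → Nat → Nat
  | 0, lo, _ => lo
  | fuel + 1, lo, hi =>
    if lo < hi then
      let mid := (lo + hi) / 2
      if x < (PySem.List.pyGet? a (mid : Int)).getD 0 then pvBisectGo a x fuel lo mid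
      else pvBisectGo a x fuel (mid + 1) hi
    else lo

def pvBisectRight (a : List Int) (x : Int) : Nat := pvBisectGo a x a.length 0 a.length

def pick_book_analogy_py_alt (chars : Int) : Option (List (String × String)) :=
  let n := if chars = 0 then 0 else chars
  if n ≤ 0 then none
  else
    match PySem.List.pyGet? pvRowsB ((pvBisectRight pvBoundsB n : Nat) : Int) with
    | some (_, _, level, options) =>
        let picked := pvPickOptionB options n
        some [ ("level", level),
               ("book", picked),
               ("text", if picked = "" then "" else "相当于写了" ++ picked) ]
    | none => none   -- unreachable: the bisect index is always 0‥8

-- ===== PRECONDITION & SPEC =====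
def Spec_pick_book_analogy_py (chars : Int) (out : Option (List (String × String))) : Prop := out = pick_book_analogy_py_alt chars
instance (chars : Int) (out : Option (List (String × String))) : Decidable (Spec_pick_book_analogy_py chars out) := by unfold Spec_pick_book_analogy_py; infer_instance

-- ===== CLAIM (what is proved, stated in full; the proofs are below) =====
def Claim_equal_pick_book_analogy_py : Prop := ∀ (chars : Int), Dom_pick_book_analogy_py chars → Spec_pick_book_analogy_py chars (pick_book_analogy_py chars)

-- ===== LEMMAS AND PROOFS =====

theorem pvPickOption_eq : pvPickOptionA = pvPickOptionB := rfl

theorem pvBisectGo_step (a : List Int) (x : Int) (fuel lo hi : Nat) (h : lo < hi) (b : Int)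
    (hb : (PySem.List.pyGet? a (((lo+hi)/2 : Nat) : Int)).getD 0 = b) :
    pvBisectGo a x (fuel + 1) lo hi =
      if x < b then pvBisectGo a x fuel lo ((lo+hi)/2) else pvBisectGo a x fuel ((lo+hi)/2 + 1) hi := by
  rw [pvBisectGo]
  simp only [h, if_true, hb]

theorem pvBisectGo_stop (a : List Int) (x : Int) (fuel lo hi : Nat) (h : ¬ lo < hi) :
    pvBisectGo a x fuel lo hi = lo := by
  cases fuel <;> simp [pvBisectGo, h]

theorem pick_book_analogy_py_spec : Claim_equal_pick_book_analogy_py := by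
  intro chars _
  unfold Spec_pick_book_analogy_py pick_book_analogy_py pick_book_analogy_py_alt
  have hn : (if chars = 0 then (0:Int) else chars) = chars := by split <;> omega
  rw [hn]
  by_cases h0 : chars ≤ 0
  · rw [if_pos h0, if_pos h0]
  · rw [if_neg h0, if_neg h0]
    by_cases c0 : chars < 100000
    · -- interval 0
      have hb : pvBisectRight pvBoundsB chars = 0 := by
        unfold pvBisectRight
        rw [show pvBoundsB.length = 8 from rfl]
        rw [show (8:Nat) = 7+1 from rfl, pvBisectGo_step _ _ _ _ _ (by norm_num) 10000000 rfl]
        rw [if_pos (by omega : chars < 10000000)]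
        rw [show (7:Nat) = 6+1 from rfl, pvBisectGo_step _ _ _ _ _ (by norm_num) 1000000 rfl]
        rw [if_pos (by omega : chars < 1000000)]
        rw [show (6:Nat) = 5+1 from rfl, pvBisectGo_step _ _ _ _ _ (by norm_num) 500000 rfl]
        rw [if_pos (by omega : chars < 500000)]
        rw [show (5:Nat) = 4+1 from rfl, pvBisectGo_step _ _ _ _ _ (by norm_num) 100000 rfl]
        rw [if_pos (by omega : chars < 100000)]
        rw [pvBisectGo_stop _ _ _ _ _ (by norm_num)]
      rw [hb]
      rw [show PySem.List.pyGet? pvRowsB ((0 : Nat) : Int) = some pvRowsB[0] from rfl]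
      simp only [pvScanA, pvRowsA, pvMkA, pvPickOption_eq]
      norm_num
      rw [if_neg (by omega : ¬ chars < 1)]
      rw [if_pos (by omega : chars < 100000)]
      simp [pvRowsB, pvRowsA, pvPickOptionB]
    · 
      by_cases c1 : chars < 500000
      · -- interval 1
        have hb : pvBisectRight pvBoundsB chars = 1 := by
          unfold pvBisectRight
          rw [show pvBoundsB.length = 8 from rfl]
          rw [show (8:Nat) = 7+1 from rfl, pvBisectGo_step _ _ _ _ _ (by norm_num) 10000000 rfl]
          rw [if_pos (by omega : chars < 10000000)]
          rw [show (7:Nat) = 6+1 from rfl, pvBisectGo_step _ _ _ _ _ (by norm_num) 1000000 rfl]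
          rw [if_pos (by omega : chars < 1000000)]
          rw [show (6:Nat) = 5+1 from rfl, pvBisectGo_step _ _ _ _ _ (by norm_num) 500000 rfl]
          rw [if_pos (by omega : chars < 500000)]
          rw [show (5:Nat) = 4+1 from rfl, pvBisectGo_step _ _ _ _ _ (by norm_num) 100000 rfl]
          rw [if_neg (by omega : ¬ chars < 100000)]
          rw [pvBisectGo_stop _ _ _ _ _ (by norm_num)]
        rw [hb]
        rw [show PySem.List.pyGet? pvRowsB ((1 : Nat) : Int) = some pvRowsB[1] from rfl]
        simp only [pvScanA, pvRowsA, pvMkA, pvPickOption_eq]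
        norm_num
        rw [if_neg (by omega : ¬ chars < 1)]
        rw [if_neg (by omega : ¬ chars < 100000)]
        rw [if_neg (by omega : ¬ chars < 100000)]
        rw [if_pos (by omega : chars < 500000)]
        simp [pvRowsB, pvRowsA, pvPickOptionB]
      · 
        by_cases c2 : chars < 1000000
        · -- interval 2
          have hb : pvBisectRight pvBoundsB chars = 2 := by
            unfold pvBisectRight
            rw [show pvBoundsB.length = 8 from rfl]
            rw [show (8:Nat) = 7+1 from rfl, pvBisectGo_step _ _ _ _ _ (by norm_num) 10000000 rfl]
            rw [if_pos (by omega : chars < 10000000)]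
            rw [show (7:Nat) = 6+1 from rfl, pvBisectGo_step _ _ _ _ _ (by norm_num) 1000000 rfl]
            rw [if_pos (by omega : chars < 1000000)]
            rw [show (6:Nat) = 5+1 from rfl, pvBisectGo_step _ _ _ _ _ (by norm_num) 500000 rfl]
            rw [if_neg (by omega : ¬ chars < 500000)]
            rw [pvBisectGo_stop _ _ _ _ _ (by norm_num)]
          rw [hb]
          rw [show PySem.List.pyGet? pvRowsB ((2 : Nat) : Int) = some pvRowsB[2] from rfl]
          simp only [pvScanA, pvRowsA, pvMkA, pvPickOption_eq]
          norm_num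
          rw [if_neg (by omega : ¬ chars < 1)]
          rw [if_neg (by omega : ¬ chars < 100000)]
          rw [if_neg (by omega : ¬ chars < 100000)]
          rw [if_neg (by omega : ¬ chars < 500000)]
          rw [if_neg (by omega : ¬ chars < 500000)]
          rw [if_pos (by omega : chars < 1000000)]
          simp [pvRowsB, pvRowsA, pvPickOptionB]
        · 
          by_cases c3 : chars < 5000000
          · -- interval 3
            have hb : pvBisectRight pvBoundsB chars = 3 := by
              unfold pvBisectRight
              rw [show pvBoundsB.length = 8 from rfl]
              rw [show (8:Nat) = 7+1 from rfl, pvBisectGo_step _ _ _ _ _ (by norm_num) 10000000 rfl]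
              rw [if_pos (by omega : chars < 10000000)]
              rw [show (7:Nat) = 6+1 from rfl, pvBisectGo_step _ _ _ _ _ (by norm_num) 1000000 rfl]
              rw [if_neg (by omega : ¬ chars < 1000000)]
              rw [show (6:Nat) = 5+1 from rfl, pvBisectGo_step _ _ _ _ _ (by norm_num) 5000000 rfl]
              rw [if_pos (by omega : chars < 5000000)]
              rw [pvBisectGo_stop _ _ _ _ _ (by norm_num)]
            rw [hb]
            rw [show PySem.List.pyGet? pvRowsB ((3 : Nat) : Int) = some pvRowsB[3] from rfl]
            simp only [pvScanA, pvRowsA, pvMkA, pvPickOption_eq]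
            norm_num
            rw [if_neg (by omega : ¬ chars < 1)]
            rw [if_neg (by omega : ¬ chars < 100000)]
            rw [if_neg (by omega : ¬ chars < 100000)]
            rw [if_neg (by omega : ¬ chars < 500000)]
            rw [if_neg (by omega : ¬ chars < 500000)]
            rw [if_neg (by omega : ¬ chars < 1000000)]
            rw [if_neg (by omega : ¬ chars < 1000000)]
            rw [if_pos (by omega : chars < 5000000)]
            simp [pvRowsB, pvRowsA, pvPickOptionB]
          · 
            by_cases c4 : chars < 10000000
            · -- interval 4
              have hb : pvBisectRight pvBoundsB chars = 4 := by
                unfold pvBisectRight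
                rw [show pvBoundsB.length = 8 from rfl]
                rw [show (8:Nat) = 7+1 from rfl, pvBisectGo_step _ _ _ _ _ (by norm_num) 10000000 rfl]
                rw [if_pos (by omega : chars < 10000000)]
                rw [show (7:Nat) = 6+1 from rfl, pvBisectGo_step _ _ _ _ _ (by norm_num) 1000000 rfl]
                rw [if_neg (by omega : ¬ chars < 1000000)]
                rw [show (6:Nat) = 5+1 from rfl, pvBisectGo_step _ _ _ _ _ (by norm_num) 5000000 rfl]
                rw [if_neg (by omega : ¬ chars < 5000000)]
                rw [pvBisectGo_stop _ _ _ _ _ (by norm_num)]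
              rw [hb]
              rw [show PySem.List.pyGet? pvRowsB ((4 : Nat) : Int) = some pvRowsB[4] from rfl]
              simp only [pvScanA, pvRowsA, pvMkA, pvPickOption_eq]
              norm_num
              rw [if_neg (by omega : ¬ chars < 1)]
              rw [if_neg (by omega : ¬ chars < 100000)]
              rw [if_neg (by omega : ¬ chars < 100000)]
              rw [if_neg (by omega : ¬ chars < 500000)]
              rw [if_neg (by omega : ¬ chars < 500000)]
              rw [if_neg (by omega : ¬ chars < 1000000)]
              rw [if_neg (by omega : ¬ chars < 1000000)]
              rw [if_neg (by omega : ¬ chars < 5000000)]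
              rw [if_neg (by omega : ¬ chars < 5000000)]
              rw [if_pos (by omega : chars < 10000000)]
              simp [pvRowsB, pvRowsA, pvPickOptionB]
            · 
              by_cases c5 : chars < 50000000
              · -- interval 5
                have hb : pvBisectRight pvBoundsB chars = 5 := by
                  unfold pvBisectRight
                  rw [show pvBoundsB.length = 8 from rfl]
                  rw [show (8:Nat) = 7+1 from rfl, pvBisectGo_step _ _ _ _ _ (by norm_num) 10000000 rfl]
                  rw [if_neg (by omega : ¬ chars < 10000000)]
                  rw [show (7:Nat) = 6+1 from rfl, pvBisectGo_step _ _ _ _ _ (by norm_num) 100000000 rfl]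
                  rw [if_pos (by omega : chars < 100000000)]
                  rw [show (6:Nat) = 5+1 from rfl, pvBisectGo_step _ _ _ _ _ (by norm_num) 50000000 rfl]
                  rw [if_pos (by omega : chars < 50000000)]
                  rw [pvBisectGo_stop _ _ _ _ _ (by norm_num)]
                rw [hb]
                rw [show PySem.List.pyGet? pvRowsB ((5 : Nat) : Int) = some pvRowsB[5] from rfl]
                simp only [pvScanA, pvRowsA, pvMkA, pvPickOption_eq]
                norm_num
                rw [if_neg (by omega : ¬ chars < 1)]
                rw [if_neg (by omega : ¬ chars < 100000)]
                rw [if_neg (by omega : ¬ chars < 100000)]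
                rw [if_neg (by omega : ¬ chars < 500000)]
                rw [if_neg (by omega : ¬ chars < 500000)]
                rw [if_neg (by omega : ¬ chars < 1000000)]
                rw [if_neg (by omega : ¬ chars < 1000000)]
                rw [if_neg (by omega : ¬ chars < 5000000)]
                rw [if_neg (by omega : ¬ chars < 5000000)]
                rw [if_neg (by omega : ¬ chars < 10000000)]
                rw [if_neg (by omega : ¬ chars < 10000000)]
                rw [if_pos (by omega : chars < 50000000)]
                simp [pvRowsB, pvRowsA, pvPickOptionB]
              · 
                by_cases c6 : chars < 100000000
                · -- interval 6
                  have hb : pvBisectRight pvBoundsB chars = 6 := by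
                    unfold pvBisectRight
                    rw [show pvBoundsB.length = 8 from rfl]
                    rw [show (8:Nat) = 7+1 from rfl, pvBisectGo_step _ _ _ _ _ (by norm_num) 10000000 rfl]
                    rw [if_neg (by omega : ¬ chars < 10000000)]
                    rw [show (7:Nat) = 6+1 from rfl, pvBisectGo_step _ _ _ _ _ (by norm_num) 100000000 rfl]
                    rw [if_pos (by omega : chars < 100000000)]
                    rw [show (6:Nat) = 5+1 from rfl, pvBisectGo_step _ _ _ _ _ (by norm_num) 50000000 rfl]
                    rw [if_neg (by omega : ¬ chars < 50000000)]
                    rw [pvBisectGo_stop _ _ _ _ _ (by norm_num)]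
                  rw [hb]
                  rw [show PySem.List.pyGet? pvRowsB ((6 : Nat) : Int) = some pvRowsB[6] from rfl]
                  simp only [pvScanA, pvRowsA, pvMkA, pvPickOption_eq]
                  norm_num
                  rw [if_neg (by omega : ¬ chars < 1)]
                  rw [if_neg (by omega : ¬ chars < 100000)]
                  rw [if_neg (by omega : ¬ chars < 100000)]
                  rw [if_neg (by omega : ¬ chars < 500000)]
                  rw [if_neg (by omega : ¬ chars < 500000)]
                  rw [if_neg (by omega : ¬ chars < 1000000)]
                  rw [if_neg (by omega : ¬ chars < 1000000)]
                  rw [if_neg (by omega : ¬ chars < 5000000)]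
                  rw [if_neg (by omega : ¬ chars < 5000000)]
                  rw [if_neg (by omega : ¬ chars < 10000000)]
                  rw [if_neg (by omega : ¬ chars < 10000000)]
                  rw [if_neg (by omega : ¬ chars < 50000000)]
                  rw [if_neg (by omega : ¬ chars < 50000000)]
                  rw [if_pos (by omega : chars < 100000000)]
                  simp [pvRowsB, pvRowsA, pvPickOptionB]
                · 
                  by_cases c7 : chars < 500000000
                  · -- interval 7
                    have hb : pvBisectRight pvBoundsB chars = 7 := by
                      unfold pvBisectRight
                      rw [show pvBoundsB.length = 8 from rfl]
                      rw [show (8:Nat) = 7+1 from rfl, pvBisectGo_step _ _ _ _ _ (by norm_num) 10000000 rfl]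
                      rw [if_neg (by omega : ¬ chars < 10000000)]
                      rw [show (7:Nat) = 6+1 from rfl, pvBisectGo_step _ _ _ _ _ (by norm_num) 100000000 rfl]
                      rw [if_neg (by omega : ¬ chars < 100000000)]
                      rw [show (6:Nat) = 5+1 from rfl, pvBisectGo_step _ _ _ _ _ (by norm_num) 500000000 rfl]
                      rw [if_pos (by omega : chars < 500000000)]
                      rw [pvBisectGo_stop _ _ _ _ _ (by norm_num)]
                    rw [hb]
                    rw [show PySem.List.pyGet? pvRowsB ((7 : Nat) : Int) = some pvRowsB[7] from rfl]
                    simp only [pvScanA, pvRowsA, pvMkA, pvPickOption_eq]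
                    norm_num
                    rw [if_neg (by omega : ¬ chars < 1)]
                    rw [if_neg (by omega : ¬ chars < 100000)]
                    rw [if_neg (by omega : ¬ chars < 100000)]
                    rw [if_neg (by omega : ¬ chars < 500000)]
                    rw [if_neg (by omega : ¬ chars < 500000)]
                    rw [if_neg (by omega : ¬ chars < 1000000)]
                    rw [if_neg (by omega : ¬ chars < 1000000)]
                    rw [if_neg (by omega : ¬ chars < 5000000)]
                    rw [if_neg (by omega : ¬ chars < 5000000)]
                    rw [if_neg (by omega : ¬ chars < 10000000)]
                    rw [if_neg (by omega : ¬ chars < 10000000)]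
                    rw [if_neg (by omega : ¬ chars < 50000000)]
                    rw [if_neg (by omega : ¬ chars < 50000000)]
                    rw [if_neg (by omega : ¬ chars < 100000000)]
                    rw [if_neg (by omega : ¬ chars < 100000000)]
                    rw [if_pos (by omega : chars < 500000000)]
                    simp [pvRowsB, pvRowsA, pvPickOptionB]
                  · 
                    have hb : pvBisectRight pvBoundsB chars = 8 := by
                      unfold pvBisectRight
                      rw [show pvBoundsB.length = 8 from rfl]
                      rw [show (8:Nat) = 7+1 from rfl, pvBisectGo_step _ _ _ _ _ (by norm_num) 10000000 rfl]
                      rw [if_neg (by omega : ¬ chars < 10000000)]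
                      rw [show (7:Nat) = 6+1 from rfl, pvBisectGo_step _ _ _ _ _ (by norm_num) 100000000 rfl]
                      rw [if_neg (by omega : ¬ chars < 100000000)]
                      rw [show (6:Nat) = 5+1 from rfl, pvBisectGo_step _ _ _ _ _ (by norm_num) 500000000 rfl]
                      rw [if_neg (by omega : ¬ chars < 500000000)]
                      rw [pvBisectGo_stop _ _ _ _ _ (by norm_num)]
                    rw [hb]
                    rw [show PySem.List.pyGet? pvRowsB ((8 : Nat) : Int) = some pvRowsB[8] from rfl]
                    simp only [pvScanA, pvRowsA, pvMkA, pvPickOption_eq]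
                    norm_num
                    rw [if_neg (by omega : ¬ chars < 1)]
                    rw [if_neg (by omega : ¬ chars < 100000)]
                    rw [if_neg (by omega : ¬ chars < 100000)]
                    rw [if_neg (by omega : ¬ chars < 500000)]
                    rw [if_neg (by omega : ¬ chars < 500000)]
                    rw [if_neg (by omega : ¬ chars < 1000000)]
                    rw [if_neg (by omega : ¬ chars < 1000000)]
                    rw [if_neg (by omega : ¬ chars < 5000000)]
                    rw [if_neg (by omega : ¬ chars < 5000000)]
                    rw [if_neg (by omega : ¬ chars < 10000000)]
                    rw [if_neg (by omega : ¬ chars < 10000000)]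
                    rw [if_neg (by omega : ¬ chars < 50000000)]
                    rw [if_neg (by omega : ¬ chars < 50000000)]
                    rw [if_neg (by omega : ¬ chars < 100000000)]
                    rw [if_neg (by omega : ¬ chars < 100000000)]
                    rw [if_neg (by omega : ¬ chars < 500000000)]
                    rw [if_neg (by omega : ¬ chars < 500000000)]
                    simp [pvRowsB, pvRowsA, pvPickOptionB]
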